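-- pv_equiv track=rewrite | github.com/vitalfocheux/Projet_Init_SAW | python/saw.py | is_saw
-- ===== SOURCE A (Python) =====
-- def is_saw(trail) :
--     posX = 0
--     posY = 0
--
--     visited = set()
--     visited.add((posX, posY))  # On part de (0,0)
--     for dir in trail:
--         if dir == 3:    # North
--             posY += 1
--         elif dir == 1:  # South
--             posY -= 1
--         elif dir == 0:  # East
--             posX += 1
--         elif dir == 2:  # West
--             posX -= 1
--
--         if (posX, posY) in visited:
--             return False
--
--         visited.add((posX, posY))
--     return True
-- ===== SOURCE B (Python) =====
-- def is_saw(trail):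
--     # 1) accumulate the full list of visited positions (no membership tests)
--     posX = 0
--     posY = 0
--     positions = [(0, 0)]
--     for dir in trail:
--         if dir == 3:    # North
--             posY += 1
--         elif dir == 1:  # South
--             posY -= 1
--         elif dir == 0:  # East
--             posX += 1
--         elif dir == 2:  # West
--             posX -= 1
--         positions.append((posX, posY))
--     # 2) sort, then a revisit shows up as two equal adjacent entries
--     positions.sort()
--     return all(p != q for p, q in zip(positions, positions[1:]))
-- ===== Notes on version B (the rewrite author's own statement) =====
-- stated objective: alternative
-- what changed: B replaces A's incremental hash-set membership test with a sort-then-scan duplicate check: it accumulates the whole list of visited positions without any membership test, sorts it, and reports a revisit iff two adjacent entries of the sorted list are equal.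
import Mathlib
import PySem

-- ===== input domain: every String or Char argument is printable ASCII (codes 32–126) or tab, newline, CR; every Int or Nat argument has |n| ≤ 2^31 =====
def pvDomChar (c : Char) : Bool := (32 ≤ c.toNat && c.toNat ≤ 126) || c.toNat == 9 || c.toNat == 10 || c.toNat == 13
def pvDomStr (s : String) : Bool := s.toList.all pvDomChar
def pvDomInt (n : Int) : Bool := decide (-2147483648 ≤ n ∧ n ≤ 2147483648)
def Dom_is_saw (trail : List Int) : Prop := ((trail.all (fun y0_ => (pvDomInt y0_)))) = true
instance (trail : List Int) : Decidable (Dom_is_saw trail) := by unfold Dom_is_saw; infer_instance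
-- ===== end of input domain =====

-- B replaces A's incremental hash-set membership test by sort-then-scan: accumulate all visited
-- positions, sort them, and look for two equal adjacent entries (objective: alternative).

-- ===== PORT A =====
-- the branch cascade on 'dir' (identical in both Python sources)
def pvStep (p : Int × Int) (d : Int) : Int × Int :=
  if d = 3 then (p.1, p.2 + 1)
  else if d = 1 then (p.1, p.2 - 1)
  else if d = 0 then (p.1 + 1, p.2)
  else if d = 2 then (p.1 - 1, p.2)
  else p

-- A's loop: early 'return False' on a revisit, carrying the visited set
def pvLoopA (p : Int × Int) (visited : PySem.Set (Int × Int)) : List Int → Bool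
  | [] => true
  | d :: rest =>
    if PySem.Set.contains visited (pvStep p d) then false
    else pvLoopA (pvStep p d) (PySem.Set.add visited (pvStep p d)) rest

def is_saw (trail : List Int) : Bool :=
  pvLoopA (0, 0) (PySem.Set.add PySem.Set.empty (0, 0)) trail

-- ===== PORT B =====
def is_saw_alt (trail : List Int) : Bool :=
  let st := trail.foldl
    (fun (st : (Int × Int) × List (Int × Int)) d =>
      let p' := pvStep st.1 d
      (p', st.2 ++ [p']))
    ((0, 0), [((0, 0) : Int × Int)])
  -- positions.sort(): Python sorts int pairs lexicographically (tuple key = both components)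
  let s := PySem.List.sorted2 st.2 (fun p => p.1) (fun p => p.2)
  -- all(p != q for p, q in zip(positions, positions[1:]))
  (s.zip (PySem.List.slice s (some 1) none)).all (fun pq => !(pq.1 == pq.2))

-- ===== PRECONDITION & SPEC =====
def Spec_is_saw (trail : List Int) (out : Bool) : Prop := out = is_saw_alt trail
instance (trail : List Int) (out : Bool) : Decidable (Spec_is_saw trail out) := by unfold Spec_is_saw; infer_instance

-- ===== CLAIM (what is proved, stated in full; the proofs are below) =====
def Claim_equal_is_saw : Prop := ∀ (trail : List Int), Dom_is_saw trail → Spec_is_saw trail (is_saw trail)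

-- ===== LEMMAS AND PROOFS =====

-- the Python tuple comparison '<' on int pairs, as sorted2 uses it
def pvLt (a b : Int × Int) : Bool :=
  decide (a.1 < b.1) || (!decide (b.1 < a.1) && decide (a.2 < b.2))

-- non-strict lex order: 'a does not come after b'
def pvLe (a b : Int × Int) : Prop := pvLt b a = false

theorem pvLt_iff (a b : Int × Int) :
    pvLt a b = true ↔ (a.1 < b.1 ∨ (a.1 = b.1 ∧ a.2 < b.2)) := by
  simp only [pvLt, Bool.or_eq_true, Bool.and_eq_true, Bool.not_eq_true',
    decide_eq_true_eq, decide_eq_false_iff_not]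
  omega

theorem pvLe_iff (a b : Int × Int) :
    pvLe a b ↔ (a.1 < b.1 ∨ (a.1 = b.1 ∧ a.2 ≤ b.2)) := by
  simp only [pvLe, Bool.eq_false_iff, Ne, pvLt_iff]
  omega

theorem pvLe_trans {a b c : Int × Int} (h1 : pvLe a b) (h2 : pvLe b c) : pvLe a c := by
  rw [pvLe_iff] at *
  omega

theorem pvLe_of_lt {a b : Int × Int} (h : pvLt a b = true) : pvLe a b := by
  rw [pvLt_iff] at h; rw [pvLe_iff]; omega

theorem pvLe_of_not_lt {a b : Int × Int} (h : pvLt a b = false) : pvLe b a := h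

theorem pvNe_of_lt_le {a b c : Int × Int} (h1 : pvLt a b = true) (h2 : pvLe b c) : a ≠ c := by
  rw [pvLt_iff] at h1; rw [pvLe_iff] at h2
  intro h; subst h; omega

theorem pvLt_of_le_ne {a b : Int × Int} (h : pvLe a b) (hne : a ≠ b) : pvLt a b = true := by
  rw [pvLe_iff] at h; rw [pvLt_iff]
  rcases a with ⟨a1, a2⟩; rcases b with ⟨b1, b2⟩
  have hd : a1 ≠ b1 ∨ a2 ≠ b2 := by
    by_contra hc
    push Not at hc
    exact hne (by simp [hc.1, hc.2])
  simp only at h ⊢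
  omega

-- insertBy with the lex comparison preserves sortedness
theorem pvInsertBy_pairwise (x : Int × Int) (ys : List (Int × Int))
    (h : ys.Pairwise pvLe) :
    (PySem.List.insertBy pvLt x ys).Pairwise pvLe := by
  induction ys with
  | nil => simp [PySem.List.insertBy]
  | cons y ys ih =>
      rw [List.pairwise_cons] at h
      simp only [PySem.List.insertBy]
      by_cases hb : pvLt x y = true
      · rw [if_pos hb]
        refine List.pairwise_cons.mpr ⟨?_, List.pairwise_cons.mpr h⟩
        intro z hz
        rcases List.mem_cons.mp hz with rfl | hz
        · exact pvLe_of_lt hb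
        · exact pvLe_trans (pvLe_of_lt hb) (h.1 z hz)
      · rw [if_neg hb]
        refine List.pairwise_cons.mpr ⟨?_, ih h.2⟩
        intro z hz
        rcases (PySem.List.mem_insertBy pvLt x z ys).mp hz with rfl | hz
        · exact pvLe_of_not_lt (Bool.eq_false_iff.mpr hb)
        · exact h.1 z hz

theorem pvSorted2_pairwise (xs : List (Int × Int)) :
    (PySem.List.sorted2 xs (fun p => p.1) (fun p => p.2)).Pairwise pvLe := by
  show (xs.foldl (fun acc x => PySem.List.insertBy _ x acc) []).Pairwise pvLe
  have hgen : ∀ (l : List (Int × Int)) (acc : List (Int × Int)), acc.Pairwise pvLe →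
      (l.foldl (fun acc x => PySem.List.insertBy pvLt x acc) acc).Pairwise pvLe := by
    intro l
    induction l with
    | nil => intro acc h; exact h
    | cons a l ih =>
        intro acc h
        exact ih _ (pvInsertBy_pairwise a acc h)
  have : (fun (a b : Int × Int) =>
      decide (a.1 < b.1) || (!decide (b.1 < a.1) && decide (a.2 < b.2))) = pvLt := rfl
  exact hgen xs [] List.Pairwise.nil

-- the adjacent-pair scan: zip(s, s[1:]) all-distinct
theorem pvZip_tail_all_ne (s : List (Int × Int)) :
    ((s.zip s.tail).all (fun pq => !(pq.1 == pq.2))) = true ↔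
      List.IsChain (fun a b => a ≠ b) s := by
  induction s with
  | nil => simp
  | cons a t ih =>
      cases t with
      | nil => simp
      | cons b r =>
          simp only [List.tail_cons, List.zip_cons_cons, List.all_cons,
            Bool.and_eq_true, List.isChain_cons_cons, Bool.not_eq_true', beq_eq_false_iff_ne]
          rw [← ih]
          simp [List.tail_cons]

-- on a lex-sorted list, adjacent-distinct is exactly Nodup
theorem pvChain_ne_iff_nodup (s : List (Int × Int)) (hs : s.Pairwise pvLe) :
    List.IsChain (fun a b => a ≠ b) s ↔ s.Nodup := by
  constructor
  · intro hc
    induction s with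
    | nil => exact List.nodup_nil
    | cons a t ih =>
        rw [List.pairwise_cons] at hs
        cases t with
        | nil => simp
        | cons b r =>
            rw [List.isChain_cons_cons] at hc
            have hrest := ih hs.2 hc.2
            refine List.nodup_cons.mpr ⟨?_, hrest⟩
            have hab : pvLt a b = true :=
              pvLt_of_le_ne (hs.1 b (List.mem_cons_self)) hc.1
            intro hmem
            rcases List.mem_cons.mp hmem with rfl | hmem
            · exact hc.1 rfl
            · have hbz : pvLe b a := (List.pairwise_cons.mp hs.2).1 a hmem
              exact pvNe_of_lt_le hab hbz rfl
  · intro hnd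
    exact List.Pairwise.isChain (List.Pairwise.imp (fun h => h) hnd)

-- the positions visited strictly after starting at p
def pvTail (p : Int × Int) : List Int → List (Int × Int)
  | [] => []
  | d :: r => pvStep p d :: pvTail (pvStep p d) r

theorem pvFoldl_tail (trail : List Int) (p : Int × Int) (acc : List (Int × Int)) :
    (trail.foldl
      (fun (st : (Int × Int) × List (Int × Int)) d =>
        let p' := pvStep st.1 d
        (p', st.2 ++ [p']))
      (p, acc)).2
    = acc ++ pvTail p trail := by
  induction trail generalizing p acc with
  | nil => simp [pvTail]
  | cons d r ih =>
      simp only [List.foldl_cons, pvTail]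
      rw [ih, List.append_assoc, List.singleton_append]

theorem pvLoopA_eq (trail : List Int) (p : Int × Int) (s : PySem.Set (Int × Int))
    (hs : s.Nodup) :
    pvLoopA p s trail = decide (s ++ pvTail p trail).Nodup := by
  induction trail generalizing p s with
  | nil => simp [pvLoopA, pvTail, hs]
  | cons d r ih =>
      simp only [pvLoopA, pvTail]
      by_cases hm : pvStep p d ∈ s
      · have hnd : ¬ (s ++ pvStep p d :: pvTail (pvStep p d) r).Nodup := by
          intro h
          rw [List.nodup_middle, List.nodup_cons] at h
          exact h.1 (List.mem_append.mpr (Or.inl hm))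
        simp [hnd, hm]
      · have hc : PySem.Set.contains s (pvStep p d) = false := by
          rw [Bool.eq_false_iff]
          intro h
          exact hm ((PySem.Set.contains_iff s (pvStep p d)).mp h)
        rw [hc]
        simp only [Bool.false_eq_true, if_false]
        rw [PySem.Set.add_of_not_mem hm,
            ih (pvStep p d) (s ++ [pvStep p d])
              (by
                rw [show s ++ [pvStep p d] = s ++ pvStep p d :: [] from rfl,
                    List.nodup_middle, List.nodup_cons]
                exact ⟨by simpa using hm, by simpa using hs⟩),
            List.append_assoc, List.singleton_append]
        rfl

-- ===== VERDICT (by name: the statement is the Claim_ definition above) =====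
theorem is_saw_spec : Claim_equal_is_saw := by
  intro trail _
  unfold Spec_is_saw is_saw is_saw_alt
  simp only [pvFoldl_tail, PySem.List.slice_from_one]
  have h0 : (PySem.Set.add (PySem.Set.empty) ((0 : Int), (0 : Int))) = [((0 : Int), (0 : Int))] := by
    decide
  rw [h0, pvLoopA_eq trail ((0 : Int), (0 : Int)) [((0 : Int), (0 : Int))] (List.nodup_singleton _),
      List.singleton_append]
  set pts := ((0 : Int), (0 : Int)) :: pvTail ((0 : Int), (0 : Int)) trail with hpts
  set s := PySem.List.sorted2 pts (fun p => p.1) (fun p => p.2) with hsorted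
  have hperm : s.Perm pts := PySem.List.sorted2_perm pts _ _ false
  have hpair := pvSorted2_pairwise pts
  rw [← hsorted] at hpair
  have : ((s.zip s.tail).all (fun pq => !(pq.1 == pq.2)))
      = decide pts.Nodup := by
    rcases Bool.eq_false_or_eq_true ((s.zip s.tail).all (fun pq => !(pq.1 == pq.2))) with hb | hb
    · rw [hb]
      symm
      rw [decide_eq_true_iff]
      exact hperm.nodup_iff.mp
        ((pvChain_ne_iff_nodup s hpair).mp ((pvZip_tail_all_ne s).mp hb))
    · rw [hb]
      symm
      rw [decide_eq_false_iff_not]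
      intro hnd
      have : List.IsChain (fun a b => a ≠ b) s :=
        (pvChain_ne_iff_nodup s hpair).mpr (hperm.nodup_iff.mpr hnd)
      rw [← pvZip_tail_all_ne] at this
      rw [hb] at this
      simp at this
  rw [this]
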